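-- pv_equiv track=rewrite | github.com/ludia8888/Icon-Blaster | ontology-management-service/analyze_imports.py | trace_dependencies
-- ===== SOURCE A (Python) =====
-- def trace_dependencies(entry_points, import_graph, all_files):
--     """Trace all dependencies from entry points"""
--     used_files = set(entry_points)
--     to_check = list(entry_points)
--
--     while to_check:
--         current = to_check.pop()
--
--         # Get imports from current file
--         for imp in import_graph.get(current, []):
--             # Convert import to possible file paths
--             imp_parts = imp.split('.')
--             possible_paths = [
--                 f"{'/'.join(imp_parts)}.py",
--                 f"{'/'.join(imp_parts)}/__init__.py"
--             ]
--
--             for path in possible_paths: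
--                 if path in all_files and path not in used_files:
--                     used_files.add(path)
--                     to_check.append(path)
--
--     return used_files
-- ===== SOURCE B (Python) =====
-- def trace_dependencies(entry_points, import_graph, all_files):
--     """Trace all dependencies from entry points (recursive DFS instead of an
--     explicit worklist loop)."""
--     used_files = set(entry_points)
--
--     def visit(node):
--         # resolve this node's imports, recording the newly discovered files
--         newly = []
--         for imp in import_graph.get(node, []):
--             imp_parts = imp.split('.')
--             possible_paths = [
--                 f"{'/'.join(imp_parts)}.py",
--                 f"{'/'.join(imp_parts)}/__init__.py"
--             ]
--             for path in possible_paths: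
--                 if path in all_files and path not in used_files:
--                     used_files.add(path)
--                     newly.append(path)
--         # recurse newest-first (the LIFO order of a stack; the returned set
--         # does not depend on this order)
--         for path in reversed(newly):
--             visit(path)
--
--     for ep in reversed(entry_points):
--         visit(ep)
--     return used_files
-- ===== Notes on version B (the rewrite author's own statement) =====
-- stated objective: alternative
-- what changed: Replaced A's explicit worklist while-loop (pop from a to_check stack) by a recursive DFS helper visit(node) that collects each node's newly discovered files and recurses on them newest-first; the import-to-path resolution logic is unchanged.
import Mathlib
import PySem

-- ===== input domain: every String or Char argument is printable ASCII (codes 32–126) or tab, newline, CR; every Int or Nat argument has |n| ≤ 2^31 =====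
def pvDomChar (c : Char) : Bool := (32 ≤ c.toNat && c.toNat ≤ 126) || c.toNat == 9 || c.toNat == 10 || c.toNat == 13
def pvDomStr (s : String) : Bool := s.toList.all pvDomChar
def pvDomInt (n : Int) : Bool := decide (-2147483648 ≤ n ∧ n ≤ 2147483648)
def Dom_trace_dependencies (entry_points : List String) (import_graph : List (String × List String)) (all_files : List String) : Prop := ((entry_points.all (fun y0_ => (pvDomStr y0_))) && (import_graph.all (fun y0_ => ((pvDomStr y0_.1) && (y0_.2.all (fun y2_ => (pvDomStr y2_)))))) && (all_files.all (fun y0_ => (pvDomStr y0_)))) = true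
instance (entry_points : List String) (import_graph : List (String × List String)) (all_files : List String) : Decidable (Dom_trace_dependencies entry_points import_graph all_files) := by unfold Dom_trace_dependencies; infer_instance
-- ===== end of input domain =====

-- B replaces A's explicit worklist while-loop by a recursive DFS helper; both return the
-- same set of reachable files (neither Python mutates its arguments).

-- shared helper (identical lines in both Pythons): the two candidate paths for one import
def pvPossible (imp : String) : List String :=
  let imp_parts := (PySem.Str.split? imp ".").getD []   -- sep "." ≠ "" so split? never fails
  let joined := PySem.Str.join "/" imp_parts
  [joined ++ ".py", joined ++ "/__init__.py"]

-- shared body of 'for path in possible_paths: if path in all_files and path not in used: …'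
-- (identical in both Pythons); state = (used_files, the list being appended to:
-- A's to_check resp. B's newly)
def tdCheck (all_files : List String) (st : PySem.Set String × List String) (path : String) :
    PySem.Set String × List String :=
  if all_files.contains path && !st.1.contains path then
    (PySem.Set.add st.1 path, st.2 ++ [path])
  else st

-- shared body of 'for imp in import_graph.get(current, []): …'
def tdStep (all_files : List String) (st : PySem.Set String × List String) (imp : String) :
    PySem.Set String × List String :=
  (pvPossible imp).foldl (tdCheck all_files) st

-- ===== PORT A =====
-- termination measure for A's while-loop: number of distinct files not yet in used_files
def tdUnused (all_files : List String) (used : PySem.Set String) : Nat :=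
  ((PySem.List.dedup all_files).filter (fun f => !used.contains f)).length

-- (the next four lemmas justify tdLoopA's termination; cited by its decreasing_by)
lemma filter_ne_length_lt {α : Type} [BEq α] [LawfulBEq α] (x : α) :
    ∀ l : List α, x ∈ l → (l.filter (fun b => !(b == x))).length < l.length := by
  intro l hx
  induction l with
  | nil => cases hx
  | cons b l ih =>
    by_cases hb : b = x
    · subst hb
      simp only [List.filter_cons, BEq.rfl, Bool.not_true, Bool.false_eq_true, if_false,
        List.length_cons]
      exact Nat.lt_succ_of_le (List.length_filter_le _ _)
    · rcases List.mem_cons.mp hx with h | h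
      · exact absurd h.symm hb
      · have hlt := ih h
        have hbx : (!(b == x)) = true := by simp [hb]
        simp only [List.filter_cons, hbx, if_true, List.length_cons]
        omega

lemma tdUnused_add_lt (all_files : List String) (u : PySem.Set String) (x : String)
    (hx : x ∈ all_files) (hu : x ∉ u) :
    tdUnused all_files (u ++ [x]) < tdUnused all_files u := by
  unfold tdUnused
  have hfun : (fun f : String => !(u ++ [x]).contains f)
      = (fun f => (!u.contains f) && !(f == x)) := by
    funext f
    by_cases hfx : f = x
    · subst hfx; simp
    · simp [hfx]
  rw [hfun]
  have hsplit : (PySem.List.dedup all_files).filter (fun f => (!u.contains f) && !(f == x))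
      = ((PySem.List.dedup all_files).filter (fun f => !u.contains f)).filter
          (fun f => !(f == x)) := by
    rw [List.filter_filter]
    congr 1
    funext f
    exact Bool.and_comm _ _
  rw [hsplit]
  apply filter_ne_length_lt
  simp only [List.mem_filter]
  exact ⟨by rw [PySem.List.mem_dedup]; exact hx, by simp [hu]⟩

lemma tdCheck_measure (all_files : List String) (st : PySem.Set String × List String)
    (path : String) :
    tdUnused all_files (tdCheck all_files st path).1 + (tdCheck all_files st path).2.length
      ≤ tdUnused all_files st.1 + st.2.length := by
  obtain ⟨u, r⟩ := st
  unfold tdCheck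
  split_ifs with h
  · rw [Bool.and_eq_true] at h
    have h1 : path ∈ all_files := by simpa using h.1
    have h2 : path ∉ u := by simpa using h.2
    have hlt := tdUnused_add_lt all_files u path h1 h2
    rw [PySem.Set.add_of_not_mem h2]
    simp only [List.length_append, List.length_cons, List.length_nil]
    omega
  · exact le_refl _

lemma foldl_measure_le {α : Type} (all_files : List String)
    (F : PySem.Set String × List String → α → PySem.Set String × List String)
    (hF : ∀ st x, tdUnused all_files (F st x).1 + (F st x).2.length
        ≤ tdUnused all_files st.1 + st.2.length) :
    ∀ (l : List α) (st : PySem.Set String × List String),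
      tdUnused all_files (l.foldl F st).1 + (l.foldl F st).2.length
        ≤ tdUnused all_files st.1 + st.2.length := by
  intro l
  induction l with
  | nil => intro st; exact le_refl _
  | cons x l ih =>
    intro st
    exact le_trans (ih (F st x)) (hF st x)

lemma tdFold_measure (all_files : List String) (l : List String)
    (st : PySem.Set String × List String) :
    tdUnused all_files (l.foldl (tdStep all_files) st).1
        + (l.foldl (tdStep all_files) st).2.length
      ≤ tdUnused all_files st.1 + st.2.length :=
  foldl_measure_le all_files (tdStep all_files)
    (fun st imp => foldl_measure_le all_files (tdCheck all_files)
      (tdCheck_measure all_files) (pvPossible imp) st) l st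

-- A's while-loop: pop the last element of to_check, run the shared inner loops over its
-- imports (appending discovered paths to to_check), repeat until the stack is empty
def tdLoopA (import_graph : List (String × List String)) (all_files : List String)
    (used : PySem.Set String) (to_check : List String) : PySem.Set String :=
  match to_check with
  | [] => used
  | y :: ys =>
    let current := (y :: ys).getLast (List.cons_ne_nil y ys)
    tdLoopA import_graph all_files
      ((PySem.Dict.getD ⟨import_graph⟩ current []).foldl (tdStep all_files)
        (used, (y :: ys).dropLast)).1
      ((PySem.Dict.getD ⟨import_graph⟩ current []).foldl (tdStep all_files)
        (used, (y :: ys).dropLast)).2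
  termination_by tdUnused all_files used + to_check.length
  decreasing_by
    have hm := tdFold_measure all_files
      (PySem.Dict.getD ⟨import_graph⟩ ((y :: ys).getLast (List.cons_ne_nil y ys)) [])
      (used, (y :: ys).dropLast)
    have hlen : ((y :: ys).dropLast).length + 1 = (y :: ys).length := by
      simp [List.length_dropLast]
    simp only [List.length_cons] at hm hlen ⊢
    omega

def trace_dependencies (entry_points : List String)
    (import_graph : List (String × List String)) (all_files : List String) : List String :=
  tdLoopA import_graph all_files (PySem.Set.ofList entry_points) entry_points

-- ===== PORT B =====
-- B's 'resolve this node's imports': the same two shared loops, collecting the newly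
-- discovered paths in a fresh list
def tdImports (import_graph : List (String × List String)) (all_files : List String)
    (node : String) (used : PySem.Set String) : PySem.Set String × List String :=
  (PySem.Dict.getD ⟨import_graph⟩ node []).foldl (tdStep all_files) (used, [])

-- B's recursive visit(node); the fuel argument only makes the recursion structural
-- (all_files.length + 1 is always enough: every nested call has strictly fewer
-- undiscovered files, see tdVisit_fuel below); it is not part of the Python
def tdVisit (import_graph : List (String × List String)) (all_files : List String) :
    Nat → String → PySem.Set String → PySem.Set String
  | 0, _, used => used
  | fuel + 1, node, used =>
    let st := tdImports import_graph all_files node used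
    st.2.reverse.foldl (fun u path => tdVisit import_graph all_files fuel path u) st.1

def trace_dependencies_alt (entry_points : List String)
    (import_graph : List (String × List String)) (all_files : List String) : List String :=
  entry_points.reverse.foldl
    (fun u ep => tdVisit import_graph all_files (all_files.length + 1) ep u)
    (PySem.Set.ofList entry_points)

-- ===== PRECONDITION & SPEC =====
def Spec_trace_dependencies (entry_points : List String) (import_graph : List (String × List String)) (all_files : List String) (out : List String) : Prop := out = trace_dependencies_alt entry_points import_graph all_files
instance (entry_points : List String) (import_graph : List (String × List String)) (all_files : List String) (out : List String) : Decidable (Spec_trace_dependencies entry_points import_graph all_files out) := by unfold Spec_trace_dependencies; infer_instance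

-- ===== CLAIM (what is proved, stated in full; the proofs are below) =====
def Claim_equal_trace_dependencies : Prop := ∀ (entry_points : List String) (import_graph : List (String × List String)) (all_files : List String), Dom_trace_dependencies entry_points import_graph all_files → Spec_trace_dependencies entry_points import_graph all_files (trace_dependencies entry_points import_graph all_files)

-- ===== LEMMAS AND PROOFS =====

-- folding a step that only appends to the second component: the initial second component
-- factors out in front
lemma foldl_shift {α : Type}
    (F : PySem.Set String × List String → α → PySem.Set String × List String)
    (hF : ∀ u r x, F (u, r) x = ((F (u, []) x).1, r ++ (F (u, []) x).2)) :
    ∀ (l : List α) (u : PySem.Set String) (r : List String),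
      l.foldl F (u, r) = ((l.foldl F (u, [])).1, r ++ (l.foldl F (u, [])).2) := by
  intro l
  induction l with
  | nil => intro u r; simp
  | cons x l ih =>
    intro u r
    simp only [List.foldl_cons]
    rw [hF u r x, hF u [] x, List.nil_append, ih (F (u, []) x).1 (r ++ (F (u, []) x).2),
      ih (F (u, []) x).1 (F (u, []) x).2, List.append_assoc]

lemma tdCheck_shift (all_files : List String) (u : PySem.Set String) (r : List String)
    (path : String) :
    tdCheck all_files (u, r) path
      = ((tdCheck all_files (u, []) path).1, r ++ (tdCheck all_files (u, []) path).2) := by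
  unfold tdCheck
  split_ifs with h <;> simp

lemma tdStep_shift (all_files : List String) (u : PySem.Set String) (r : List String)
    (imp : String) :
    tdStep all_files (u, r) imp
      = ((tdStep all_files (u, []) imp).1, r ++ (tdStep all_files (u, []) imp).2) :=
  foldl_shift (tdCheck all_files) (tdCheck_shift all_files) (pvPossible imp) u r

-- A's inner fold starting from the current stack equals B's tdImports with the stack
-- glued back in front of the newly discovered paths
lemma tdFold_shift (import_graph : List (String × List String)) (all_files : List String)
    (current : String) (u : PySem.Set String) (rest : List String) :
    (PySem.Dict.getD ⟨import_graph⟩ current []).foldl (tdStep all_files) (u, rest)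
      = ((tdImports import_graph all_files current u).1,
          rest ++ (tdImports import_graph all_files current u).2) := by
  unfold tdImports
  exact foldl_shift (tdStep all_files) (tdStep_shift all_files) _ u rest

-- visiting only grows used_files, so the measure never increases
lemma tdVisit_mono (import_graph : List (String × List String)) (all_files : List String) :
    ∀ (d : Nat) (p : String) (u : PySem.Set String),
      tdUnused all_files (tdVisit import_graph all_files d p u) ≤ tdUnused all_files u := by
  intro d
  induction d with
  | zero => intro p u; exact le_refl _
  | succ d ih =>
    intro p u
    simp only [tdVisit]
    have hst := tdFold_measure all_files (PySem.Dict.getD ⟨import_graph⟩ p [])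
      (u, ([] : List String))
    have hfold : ∀ (l : List String) (a : PySem.Set String),
        tdUnused all_files
            (l.foldl (fun x q => tdVisit import_graph all_files d q x) a)
          ≤ tdUnused all_files a := by
      intro l
      induction l with
      | nil => intro a; exact le_refl _
      | cons q l ihl =>
        intro a
        exact le_trans (ihl _) (ih q a)
    exact le_trans (hfold _ _) (by simpa using le_trans (Nat.le_add_right _ _) hst)

-- replacing the fuel underneath a fold of visits, given enough fuel at every state
lemma foldl_visit_congr (import_graph : List (String × List String))
    (all_files : List String) (d₀ d₁ c : Nat)
    (H : ∀ (p : String) (a : PySem.Set String), tdUnused all_files a ≤ c →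
      tdVisit import_graph all_files d₀ p a = tdVisit import_graph all_files d₁ p a) :
    ∀ (l : List String) (a : PySem.Set String), tdUnused all_files a ≤ c →
      l.foldl (fun x p => tdVisit import_graph all_files d₀ p x) a
        = l.foldl (fun x p => tdVisit import_graph all_files d₁ p x) a := by
  intro l
  induction l with
  | nil => intro a _; rfl
  | cons p l ih =>
    intro a ha
    simp only [List.foldl_cons]
    rw [H p a ha]
    exact ih _ (le_trans (tdVisit_mono import_graph all_files d₁ p a) ha)

-- any two sufficiently large fuels give the same visit
lemma tdVisit_fuel (import_graph : List (String × List String)) (all_files : List String) :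
    ∀ (k : Nat) (u : PySem.Set String) (p : String) (d d' : Nat),
      tdUnused all_files u ≤ k → tdUnused all_files u < d → tdUnused all_files u < d' →
      tdVisit import_graph all_files d p u = tdVisit import_graph all_files d' p u := by
  intro k
  induction k with
  | zero =>
    intro u p d d' hk hd hd'
    obtain ⟨d, rfl⟩ : ∃ e, d = e + 1 := ⟨d - 1, by omega⟩
    obtain ⟨d', rfl⟩ : ∃ e, d' = e + 1 := ⟨d' - 1, by omega⟩
    simp only [tdVisit]
    have hst := tdFold_measure all_files (PySem.Dict.getD ⟨import_graph⟩ p [])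
      (u, ([] : List String))
    have hnil : (tdImports import_graph all_files p u).2 = [] := by
      have hl : (tdImports import_graph all_files p u).2.length = 0 := by
        unfold tdImports; simp only [List.length_nil] at hst; omega
      exact List.length_eq_zero_iff.mp hl
    rw [hnil]
    rfl
  | succ k ih =>
    intro u p d d' hk hd hd'
    obtain ⟨d, rfl⟩ : ∃ e, d = e + 1 := ⟨d - 1, by omega⟩
    obtain ⟨d', rfl⟩ : ∃ e, d' = e + 1 := ⟨d' - 1, by omega⟩
    simp only [tdVisit]
    have hst := tdFold_measure all_files (PySem.Dict.getD ⟨import_graph⟩ p [])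
      (u, ([] : List String))
    rcases List.eq_nil_or_concat (tdImports import_graph all_files p u).2 with hnil | hne
    · rw [hnil]; rfl
    · have hlen : 1 ≤ (tdImports import_graph all_files p u).2.length := by
        obtain ⟨l', b, he⟩ := hne; rw [he]; simp
      have hcnt : tdUnused all_files (tdImports import_graph all_files p u).1
          + (tdImports import_graph all_files p u).2.length ≤ tdUnused all_files u := by
        unfold tdImports; simpa using hst
      apply foldl_visit_congr import_graph all_files d d'
        (tdUnused all_files (tdImports import_graph all_files p u).1)
      · intro q a ha
        exact ih a q d d' (by omega) (by omega) (by omega)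
      · exact le_refl _

-- the measure is bounded by the number of files
lemma tdUnused_le (all_files : List String) (u : PySem.Set String) :
    tdUnused all_files u ≤ all_files.length := by
  unfold tdUnused
  calc ((PySem.List.dedup all_files).filter _).length
      ≤ (PySem.List.dedup all_files).length := List.length_filter_le _ _
    _ ≤ all_files.length := by
        rw [PySem.List.dedup_eq_ofList]; exact PySem.Set.length_ofList_le _

-- MAIN LEMMA: A's worklist loop is B's fold of visits over the reversed stack
lemma tdLoopA_eq (import_graph : List (String × List String)) (all_files : List String) :
    ∀ (m : Nat) (u : PySem.Set String) (s : List String),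
      tdUnused all_files u + s.length ≤ m →
      tdLoopA import_graph all_files u s
        = s.reverse.foldl
            (fun a p => tdVisit import_graph all_files (all_files.length + 1) p a) u := by
  intro m
  induction m with
  | zero =>
    intro u s hm
    have hs : s = [] := List.length_eq_zero_iff.mp (by omega)
    subst hs
    rw [tdLoopA]
    simp
  | succ m ih =>
    intro u s hm
    rcases s with _ | ⟨x, xs⟩
    · rw [tdLoopA]; simp
    · have hcnt : tdUnused all_files
            (tdImports import_graph all_files ((x :: xs).getLast (List.cons_ne_nil x xs)) u).1
          + (tdImports import_graph all_files
              ((x :: xs).getLast (List.cons_ne_nil x xs)) u).2.length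
          ≤ tdUnused all_files u := by
        simpa [tdImports] using tdFold_measure all_files
          (PySem.Dict.getD ⟨import_graph⟩ ((x :: xs).getLast (List.cons_ne_nil x xs)) [])
          (u, ([] : List String))
      rw [tdLoopA, tdFold_shift]
      set c := (x :: xs).getLast (List.cons_ne_nil x xs) with hc
      have hsplit : (x :: xs).dropLast ++ [c] = x :: xs :=
        List.dropLast_append_getLast (List.cons_ne_nil x xs)
      rw [ih _ _ (by
        have hdl : ((x :: xs).dropLast).length = xs.length := by
          simp [List.length_dropLast]
        simp only [List.length_append, hdl, List.length_cons] at hm ⊢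
        omega)]
      rw [List.reverse_append, List.foldl_append]
      conv_rhs => rw [← hsplit, List.reverse_append]
      simp only [List.reverse_cons, List.reverse_nil, List.nil_append, List.foldl_cons,
        List.singleton_append]
      congr 1
      rw [show tdVisit import_graph all_files (all_files.length + 1) c u
            = (tdImports import_graph all_files c u).2.reverse.foldl
                (fun a path => tdVisit import_graph all_files all_files.length path a)
                (tdImports import_graph all_files c u).1 from rfl]
      rcases List.eq_nil_or_concat (tdImports import_graph all_files c u).2 with hnil | hne
      · rw [hnil]; rfl
      · have hlen : 1 ≤ (tdImports import_graph all_files c u).2.length := by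
          obtain ⟨l', b, he⟩ := hne; rw [he]; simp
        have hbound := tdUnused_le all_files u
        apply foldl_visit_congr import_graph all_files (all_files.length + 1) all_files.length
          (tdUnused all_files (tdImports import_graph all_files c u).1)
        · intro q a ha
          exact tdVisit_fuel import_graph all_files (tdUnused all_files a) a q
            (all_files.length + 1) all_files.length le_rfl (by omega) (by omega)
        · exact le_refl _

-- ===== VERDICT (by name: the statement is the Claim_ definition above) =====
theorem trace_dependencies_spec : Claim_equal_trace_dependencies := by
  intro entry_points import_graph all_files _
  unfold Spec_trace_dependencies trace_dependencies trace_dependencies_alt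
  exact tdLoopA_eq import_graph all_files
    (tdUnused all_files (PySem.Set.ofList entry_points) + entry_points.length)
    (PySem.Set.ofList entry_points) entry_points (le_refl _)
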